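-- pv_equiv track=rewrite | github.com/alexandraback/datacollection | solutions_2751486_0/Python/kpirate/consonants.py | consecutive_consonant_starts
-- ===== SOURCE A (Python) =====
-- def consecutive_consonant_starts(name, n):
--     """Return a list of locations (indexes) in the name where runs of n or
--     more consonants begin."""
--
--     starts = []
--     for index in range(len(name) - (n-1)):
--         substr = name[index:index + n]
--         if 'a' not in substr and 'e' not in substr and 'i' not in substr \
--            and 'o' not in substr and 'u' not in substr:
--             starts.append(index)
--     return starts
-- ===== SOURCE B (Python) =====
-- def consecutive_consonant_starts(name, n):
--     """Return a list of locations (indexes) in the name where runs of n or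
--     more consonants begin.
--
--     One pass: track the index of the most recently seen vowel; the window
--     of length n starting at i = j - n + 1 is vowel-free exactly when the
--     last vowel index is < i."""
--     starts = []
--     last_vowel = -1
--     for j, ch in enumerate(name):
--         if ch in 'aeiou':
--             last_vowel = j
--         i = j - n + 1
--         if i >= 0 and last_vowel < i:
--             starts.append(i)
--     return starts
-- ===== Notes on version B (the rewrite author's own statement) =====
-- stated objective: alternative
-- what changed: Replaces the per-index length-n slice scan with a single pass that tracks the index of the most recent vowel; a window is vowel-free iff the last vowel lies before its start (asymptotically O(L) vs O(L*n), though a timing run could not verify a measured speed-up).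
-- outside the precondition, e.g. on consecutive_consonant_starts('ae', 0): A returns [0, 1, 2], B returns [1, 2]; on consecutive_consonant_starts('ab', -1): A returns [1, 2, 3], B returns [2, 3]
import Mathlib
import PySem

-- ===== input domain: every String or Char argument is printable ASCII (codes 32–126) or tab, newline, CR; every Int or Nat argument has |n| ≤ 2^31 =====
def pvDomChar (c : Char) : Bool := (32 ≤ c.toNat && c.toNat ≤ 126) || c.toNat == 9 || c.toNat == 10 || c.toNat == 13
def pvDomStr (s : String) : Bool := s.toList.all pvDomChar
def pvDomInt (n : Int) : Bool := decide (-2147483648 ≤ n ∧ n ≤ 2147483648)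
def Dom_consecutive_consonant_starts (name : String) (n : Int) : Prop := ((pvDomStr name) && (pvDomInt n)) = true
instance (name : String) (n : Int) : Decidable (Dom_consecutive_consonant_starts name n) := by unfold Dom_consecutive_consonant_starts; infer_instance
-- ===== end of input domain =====

-- B replaces A's per-start length-n slice scan with one pass that tracks the last vowel index.

-- ===== PORT A =====
-- Python's  'a' not in substr  is substring containment; for a one-character needle it is
-- exactly char membership in the slice, ported as list non-membership.
def consecutive_consonant_starts (name : String) (n : Int) : List Int :=
  let cs := name.toList
  (PySem.List.pyRange 0 ((cs.length : Int) - (n - 1))).foldl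
    (fun starts index =>
      let substr := PySem.List.slice cs (some index) (some (index + n))
      if 'a' ∉ substr ∧ 'e' ∉ substr ∧ 'i' ∉ substr ∧ 'o' ∉ substr ∧ 'u' ∉ substr
      then starts ++ [index] else starts) []

-- ===== PORT B =====
-- B-side helper: one step of the loop body of Source B ('ch in "aeiou"' is char membership).
def pvStepB (n : Int) (st : List Int × Int) (p : Int × Char) : List Int × Int :=
  let lv := if p.2 ∈ (['a', 'e', 'i', 'o', 'u'] : List Char) then p.1 else st.2
  let i := p.1 - n + 1
  (if 0 ≤ i ∧ lv < i then st.1 ++ [i] else st.1, lv)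

def consecutive_consonant_starts_alt (name : String) (n : Int) : List Int :=
  ((PySem.List.enumerate name.toList 0).foldl (pvStepB n) ([], -1)).1

-- ===== PRECONDITION & SPEC =====
-- Pre_ restricts to run lengths n ≥ 1, the function's natural domain: for n ≤ 0 A still
-- returns index lists, but they arise from empty and negative-end slices (Python's
-- negative-slice wraparound) and are accidental, so they are excluded.
def Pre_consecutive_consonant_starts (name : String) (n : Int) : Prop := 1 ≤ n
instance (name : String) (n : Int) : Decidable (Pre_consecutive_consonant_starts name n) := by unfold Pre_consecutive_consonant_starts; infer_instance

def pvWitness_consecutive_consonant_starts : String × Int := ("strength", 3)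

def Spec_consecutive_consonant_starts (name : String) (n : Int) (out : List Int) : Prop := out = consecutive_consonant_starts_alt name n
instance (name : String) (n : Int) (out : List Int) : Decidable (Spec_consecutive_consonant_starts name n out) := by unfold Spec_consecutive_consonant_starts; infer_instance

-- ===== CLAIM (what is proved, stated in full; the proofs are below) =====
def Claim_equal_consecutive_consonant_starts : Prop := ∀ (name : String) (n : Int), Dom_consecutive_consonant_starts name n → Pre_consecutive_consonant_starts name n → Spec_consecutive_consonant_starts name n (consecutive_consonant_starts name n)

-- ===== LEMMAS AND PROOFS =====

-- A's window test at start i, as a named (reducible) predicate.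
abbrev pvGood (cs : List Char) (n i : Int) : Prop :=
  'a' ∉ PySem.List.slice cs (some i) (some (i + n)) ∧
  'e' ∉ PySem.List.slice cs (some i) (some (i + n)) ∧
  'i' ∉ PySem.List.slice cs (some i) (some (i + n)) ∧
  'o' ∉ PySem.List.slice cs (some i) (some (i + n)) ∧
  'u' ∉ PySem.List.slice cs (some i) (some (i + n))

lemma pvA_eq_filter (name : String) (n : Int) :
    consecutive_consonant_starts name n
      = (PySem.List.pyRange 0 ((name.toList.length : Int) - (n - 1))).filter
          (fun i => decide (pvGood name.toList n i)) := by
  unfold consecutive_consonant_starts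
  exact (PySem.List.foldl_append_ite_eq_filter (fun i => pvGood name.toList n i) _ _).trans
    (List.nil_append _)

lemma pvGood_iff_forall (cs : List Char) (n i : Int) :
    pvGood cs n i ↔
      ∀ a ∈ PySem.List.slice cs (some i) (some (i + n)), a ∉ (['a', 'e', 'i', 'o', 'u'] : List Char) := by
  constructor
  · rintro ⟨ha, he, hi2, ho, hu⟩ a hmem hvow
    simp only [List.mem_cons, List.not_mem_nil, or_false] at hvow
    rcases hvow with rfl | rfl | rfl | rfl | rfl
    exacts [ha hmem, he hmem, hi2 hmem, ho hmem, hu hmem]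
  · intro h
    exact ⟨fun hm => h _ hm (by simp), fun hm => h _ hm (by simp), fun hm => h _ hm (by simp),
           fun hm => h _ hm (by simp), fun hm => h _ hm (by simp)⟩

lemma pvGood_stable {n : Int} (hn : 1 ≤ n) {xs : List Char} {c : Char} {i : Int}
    (h0 : 0 ≤ i) (h : i + n ≤ (xs.length : Int)) :
    pvGood (xs ++ [c]) n i ↔ pvGood xs n i := by
  have hslice : PySem.List.slice (xs ++ [c]) (some i) (some (i + n))
      = PySem.List.slice xs (some i) (some (i + n)) := by
    rw [PySem.List.slice_toNat _ h0 (by omega), PySem.List.slice_toNat _ h0 (by omega),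
        List.drop_append_of_le_length (by omega),
        List.take_append_of_le_length (by simp [List.length_drop]; omega)]
  rw [pvGood, hslice]

-- the index of the most recent vowel (-1 if none), relationally
def pvIsLastV (cs : List Char) (lv : Int) : Prop :=
  -1 ≤ lv ∧ lv < (cs.length : Int) ∧
  (∀ k : Nat, (hk : k < cs.length) → lv < (k : Int) → cs[k] ∉ (['a', 'e', 'i', 'o', 'u'] : List Char)) ∧
  (lv = -1 ∨ ∃ hl : lv.toNat < cs.length, cs[lv.toNat] ∈ (['a', 'e', 'i', 'o', 'u'] : List Char))

lemma pvLastV_lt_iff {cs : List Char} {lv : Int} (h : pvIsLastV cs lv) {i : Int} (hi : 0 ≤ i) :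
    lv < i ↔ ∀ a ∈ cs.drop i.toNat, a ∉ (['a', 'e', 'i', 'o', 'u'] : List Char) := by
  obtain ⟨h1, h2, h3, h4⟩ := h
  constructor
  · intro hlt a ha hvow
    rw [List.mem_iff_getElem] at ha
    obtain ⟨j, hj, hje⟩ := ha
    rw [List.getElem_drop] at hje
    have hjl : i.toNat + j < cs.length := by
      simp only [List.length_drop] at hj; omega
    exact h3 (i.toNat + j) hjl (by omega) (by rwa [hje])
  · intro hall
    by_contra hle
    have hlv0 : 0 ≤ lv := by omega
    rcases h4 with rfl | ⟨hl, hm⟩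
    · omega
    · refine hall _ ?_ hm
      rw [List.mem_iff_getElem]
      refine ⟨lv.toNat - i.toNat, by simp only [List.length_drop]; omega, ?_⟩
      rw [List.getElem_drop]
      have hidx : i.toNat + (lv.toNat - i.toNat) = lv.toNat := by omega
      simp [hidx]

lemma pvIsLastV_step {xs : List Char} {lv : Int} {c : Char} (h : pvIsLastV xs lv) :
    pvIsLastV (xs ++ [c])
      (if c ∈ (['a', 'e', 'i', 'o', 'u'] : List Char) then (xs.length : Int) else lv) := by
  obtain ⟨h1, h2, h3, h4⟩ := h
  by_cases hc : c ∈ (['a', 'e', 'i', 'o', 'u'] : List Char)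
  · rw [if_pos hc]
    refine ⟨by omega, by simp [List.length_append], ?_, ?_⟩
    · intro k hk hlt
      exfalso
      simp only [List.length_append, List.length_singleton] at hk
      omega
    · right
      refine ⟨by simp, ?_⟩
      have ht : ((xs.length : Int)).toNat = xs.length := Int.toNat_natCast _
      simp only [ht, List.getElem_concat_length]
      exact hc
  · rw [if_neg hc]
    refine ⟨h1, by simp [List.length_append]; omega, ?_, ?_⟩
    · intro k hk hlt
      simp only [List.length_append, List.length_singleton] at hk
      by_cases hkl : k < xs.length
      · rw [List.getElem_append_left hkl]
        exact h3 k hkl hlt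
      · have hk' : k = xs.length := by omega
        subst hk'
        rw [List.getElem_concat_length]
        · exact hc
        · rfl
    · rcases h4 with rfl | ⟨hl, hm⟩
      · exact Or.inl rfl
      · right
        refine ⟨by simp [List.length_append]; omega, ?_⟩
        rw [List.getElem_append_left hl]
        exact hm

lemma pvEnum_append (xs : List Char) (c : Char) (s : Int) :
    PySem.List.enumerate (xs ++ [c]) s
      = PySem.List.enumerate xs s ++ [(s + (xs.length : Int), c)] := by
  induction xs generalizing s with
  | nil => simp [PySem.List.enumerate_cons, PySem.List.enumerate_nil]
  | cons x xs ih =>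
      have hlen : s + 1 + (xs.length : Int) = s + ((x :: xs).length : Int) := by
        simp [List.length_cons]; ring
      rw [List.cons_append, PySem.List.enumerate_cons, ih (s + 1), hlen,
          PySem.List.enumerate_cons]
      rfl

lemma pvKey (n : Int) (hn : 1 ≤ n) (cs : List Char) :
    ((PySem.List.enumerate cs 0).foldl (pvStepB n) ([], -1)).1
        = (PySem.List.pyRange 0 ((cs.length : Int) - (n - 1))).filter
            (fun i => decide (pvGood cs n i))
      ∧ pvIsLastV cs ((PySem.List.enumerate cs 0).foldl (pvStepB n) ([], -1)).2 := by
  induction cs using List.reverseRecOn with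
  | nil =>
      refine ⟨?_, ?_⟩
      · rw [PySem.List.pyRange_one_eq_nil (by simp; omega)]
        simp [PySem.List.enumerate_nil]
      · simp only [PySem.List.enumerate_nil, List.foldl_nil]
        exact ⟨by norm_num, by simp, by intro k hk; simp at hk, Or.inl rfl⟩
  | append_singleton xs c ih =>
      obtain ⟨ih1, ih2⟩ := ih
      rw [pvEnum_append xs c 0, List.foldl_append]
      set st := (PySem.List.enumerate xs 0).foldl (pvStepB n) ([], -1) with hst
      simp only [List.foldl_cons, List.foldl_nil]
      have h0L : (0 : Int) + (xs.length : Int) = (xs.length : Int) := by ring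
      rw [h0L]
      set L : Int := (xs.length : Int) with hL
      have hstep : pvStepB n st (L, c)
          = (if 0 ≤ L - n + 1 ∧ (if c ∈ (['a', 'e', 'i', 'o', 'u'] : List Char) then L else st.2) < L - n + 1
               then st.1 ++ [L - n + 1] else st.1,
             if c ∈ (['a', 'e', 'i', 'o', 'u'] : List Char) then L else st.2) := rfl
      rw [hstep]
      set lv' := if c ∈ (['a', 'e', 'i', 'o', 'u'] : List Char) then L else st.2 with hlv'
      have hinv' : pvIsLastV (xs ++ [c]) lv' := pvIsLastV_step ih2
      have hlen : (((xs ++ [c]).length : Nat) : Int) = L + 1 := by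
        simp [List.length_append, hL]
      refine ⟨?_, hinv'⟩
      rw [hlen]
      by_cases hi0 : 0 ≤ L - n + 1
      · have hsplit : PySem.List.pyRange 0 ((L + 1) - (n - 1))
            = PySem.List.pyRange 0 (L - (n - 1)) ++ [L - n + 1] := by
          have h1 : (L + 1) - (n - 1) = (L - (n - 1)) + 1 := by ring
          have h2 : L - (n - 1) = L - n + 1 := by ring
          rw [h1, PySem.List.pyRange_one_succ_right (by omega), h2]
        rw [hsplit, List.filter_append]
        have hcongr : (PySem.List.pyRange 0 (L - (n - 1))).filter
              (fun i => decide (pvGood (xs ++ [c]) n i))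
            = (PySem.List.pyRange 0 (L - (n - 1))).filter (fun i => decide (pvGood xs n i)) := by
          apply List.filter_congr
          intro x hx
          rw [PySem.List.mem_pyRange_one] at hx
          simp only [decide_eq_decide]
          exact pvGood_stable hn hx.1 (by omega)
        rw [hcongr, ← ih1]
        have hwin : pvGood (xs ++ [c]) n (L - n + 1) ↔ lv' < L - n + 1 := by
          rw [pvGood_iff_forall]
          have hdrop : PySem.List.slice (xs ++ [c]) (some (L - n + 1)) (some ((L - n + 1) + n))
              = (xs ++ [c]).drop (L - n + 1).toNat := by
            rw [PySem.List.slice_toNat _ hi0 (by omega)]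
            apply List.take_of_length_le
            simp only [List.length_drop, List.length_append, List.length_singleton]
            omega
          rw [hdrop]
          exact (pvLastV_lt_iff hinv' hi0).symm
        by_cases hv : lv' < L - n + 1
        · rw [if_pos ⟨hi0, hv⟩]
          simp [hwin, hv]
        · rw [if_neg (fun hcontr => hv hcontr.2)]
          simp [hwin, hv]
      · have hnil1 : PySem.List.pyRange 0 ((L + 1) - (n - 1)) = [] :=
          PySem.List.pyRange_one_eq_nil (by omega)
        have hnil2 : PySem.List.pyRange 0 (L - (n - 1)) = [] :=
          PySem.List.pyRange_one_eq_nil (by omega)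
        have hst1 : st.1 = [] := by rw [ih1, hnil2]; rfl
        rw [hnil1, if_neg (fun hcontr => hi0 hcontr.1), hst1]
        rfl

-- ===== VERDICT (by name: the statement is the Claim_ definition above) =====
theorem consecutive_consonant_starts_spec : Claim_equal_consecutive_consonant_starts := by
  intro name n _ hpre
  show consecutive_consonant_starts name n = consecutive_consonant_starts_alt name n
  rw [pvA_eq_filter]
  unfold consecutive_consonant_starts_alt
  exact ((pvKey n hpre name.toList).1).symm
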